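-- pv_equiv track=rewrite | github.com/quanc1989/qiaseq-dna | metrics/umi_depths.py | bedSubtract
-- ===== SOURCE A (Python) =====
-- def bedMerge(bedIn):
--
--    # done if input is an empty list
--    if len(bedIn) == 0:
--       return bedIn
--
--    # sort regions (inefficient because already sorted sometimes)
--    bedIn.sort()
--
--    # do a 3-column merge
--    bedOut = []
--    bedOut.append(bedIn[0])
--    for region2 in bedIn[1:]:
--       (chrom2, locL2, locR2) = region2
--       (chrom1, locL1, locR1) = bedOut[-1]
--       if chrom2 != chrom1 or locL2 > locR1:
--          bedOut.append((chrom2, locL2, locR2))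
--       elif locR2 > locR1:
--          bedOut[-1] = (chrom1, locL1, locR2)
--
--    # done
--    return bedOut
--
-- def bedSubtract(a,b):
--
--    # A and B must both be merged
--    a = bedMerge(a)
--    b = bedMerge(b)
--
--    # save region boundaries
--    vec = []
--    for aVec in a:
--       (chrom, locL, locR) = aVec
--       vec.append((chrom, locL,  1))
--       vec.append((chrom, locR, -1))
--    for bVec in b:
--       (chrom, locL, locR) = bVec
--       vec.append((chrom, locL, -1))
--       vec.append((chrom, locR,  1))
--    vec.sort()
--
--    # subtract C = A - B
--    c = []
--    depthNet = 0
--    locLast = None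
--    for (chrom, loc, depth) in vec:
--       if depthNet == 1 and loc - locLast > 0:
--          c.append((chrom, locLast, loc))
--       locLast = loc
--       depthNet += depth
--
--    # merge bookends
--    c = bedMerge(c)
--    return c
-- ===== SOURCE B (Python) =====
-- # B: instead of sorting a global event vector and sweeping a running depth,
-- # group boundaries per chromosome and directly count the net coverage of each
-- # elementary segment between adjacent boundary points.
--
-- def bedMerge(bedIn):
--
--    # done if input is an empty list
--    if len(bedIn) == 0:
--       return bedIn
--
--    # sort regions (inefficient because already sorted sometimes)
--    bedIn.sort()
--
--    # do a 3-column merge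
--    bedOut = []
--    bedOut.append(bedIn[0])
--    for region2 in bedIn[1:]:
--       (chrom2, locL2, locR2) = region2
--       (chrom1, locL1, locR1) = bedOut[-1]
--       if chrom2 != chrom1 or locL2 > locR1:
--          bedOut.append((chrom2, locL2, locR2))
--       elif locR2 > locR1:
--          bedOut[-1] = (chrom1, locL1, locR2)
--
--    # done
--    return bedOut
--
-- def cover(l, r, p):
--    # net contribution of the region (l, r) to the coverage of point p
--    return (1 if l <= p else 0) - (1 if r <= p else 0)
--
-- def bedSubtract(a, b):
--
--    # A and B must both be merged
--    a = bedMerge(a)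
--    b = bedMerge(b)
--
--    # per chromosome, cut the line at every region boundary and count coverage
--    chroms = sorted(set([x[0] for x in a] + [x[0] for x in b]))
--    c = []
--    for ch in chroms:
--       aIv = [(l, r) for (c2, l, r) in a if c2 == ch]
--       bIv = [(l, r) for (c2, l, r) in b if c2 == ch]
--       pts = sorted(set([p for iv in aIv + bIv for p in iv]))
--       for (p, q) in zip(pts, pts[1:]):
--          net = sum(cover(l, r, p) for (l, r) in aIv) - sum(cover(l, r, p) for (l, r) in bIv)
--          if net == 1:
--             c.append((ch, p, q))
--
--    # merge bookends
--    c = bedMerge(c)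
--    return c
-- ===== Notes on version B (the rewrite author's own statement) =====
-- stated objective: alternative
-- what changed: Replaces the global sorted event vector and running depth counter with a per-chromosome grouping that cuts the line at every region boundary and directly counts the net coverage of each elementary segment.
import Mathlib
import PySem

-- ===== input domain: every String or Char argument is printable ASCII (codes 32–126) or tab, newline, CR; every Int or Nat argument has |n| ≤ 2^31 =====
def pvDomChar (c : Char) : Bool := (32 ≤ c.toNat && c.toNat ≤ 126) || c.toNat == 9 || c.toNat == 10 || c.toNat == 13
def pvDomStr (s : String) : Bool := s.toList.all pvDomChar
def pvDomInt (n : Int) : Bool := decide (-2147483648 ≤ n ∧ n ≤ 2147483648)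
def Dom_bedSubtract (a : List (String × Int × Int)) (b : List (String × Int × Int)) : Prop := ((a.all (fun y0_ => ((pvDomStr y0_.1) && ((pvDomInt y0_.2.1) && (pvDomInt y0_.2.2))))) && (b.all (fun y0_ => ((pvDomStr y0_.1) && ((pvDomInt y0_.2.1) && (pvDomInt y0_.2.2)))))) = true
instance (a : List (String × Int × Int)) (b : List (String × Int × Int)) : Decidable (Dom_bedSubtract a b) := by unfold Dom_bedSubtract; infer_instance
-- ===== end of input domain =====

-- B replaces A's global sorted event vector + running depth sweep by per-chromosome
-- boundary points with direct net-coverage counting of each elementary segment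
-- (objective: alternative).  Note: both versions sort the argument lists in place
-- via bedMerge (same mutation); the theorems below are about the return value.

-- ===== PORT A =====

-- Python tuple comparison is lexicographic: sort key into the lexicographic product order
def pvKey3 (t : String × Int × Int) : Lex (String × Lex (Int × Int)) :=
  toLex (t.1, toLex (t.2.1, t.2.2))

-- shared helper bedMerge (used verbatim by both the Python A and the Python B)
def bedMergeL (bedIn : List (String × Int × Int)) : List (String × Int × Int) :=
  if bedIn.length = 0 then bedIn
  else
    let s := PySem.List.sorted bedIn pvKey3 false
    match s with
    | [] => []  -- unreachable: sorted of a non-empty list is non-empty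
    | r0 :: rest =>
      rest.foldl (fun bedOut region2 =>
        match bedOut.getLast? with
        | some (chrom1, locL1, locR1) =>
          if region2.1 ≠ chrom1 ∨ region2.2.1 > locR1 then bedOut ++ [region2]
          else if region2.2.2 > locR1 then bedOut.dropLast ++ [(chrom1, locL1, region2.2.2)]
          else bedOut
        | none => bedOut)  -- unreachable: bedOut is never empty
        [r0]

def bedSubtract (a : List (String × Int × Int)) (b : List (String × Int × Int)) : List (String × Int × Int) :=
  let a' := bedMergeL a
  let b' := bedMergeL b
  -- save region boundaries
  let vec0 := a'.foldl (fun v t => v ++ [(t.1, t.2.1, (1 : Int)), (t.1, t.2.2, (-1 : Int))]) []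
  let vec1 := b'.foldl (fun v t => v ++ [(t.1, t.2.1, (-1 : Int)), (t.1, t.2.2, (1 : Int))]) vec0
  let vecS := PySem.List.sorted vec1 pvKey3 false
  -- subtract C = A - B  (state: (c, depthNet, locLast); locLast = none only before
  -- the first event, where depthNet = 0 ≠ 1 so Python never evaluates loc - locLast)
  let st := vecS.foldl
    (fun (st : List (String × Int × Int) × Int × Option Int) e =>
      let c := match st.2.2 with
        | some locLast =>
          if st.2.1 = 1 ∧ e.2.1 - locLast > 0 then st.1 ++ [(e.1, locLast, e.2.1)] else st.1
        | none => st.1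
      (c, st.2.1 + e.2.2, some e.2.1))
    ([], 0, none)
  -- merge bookends
  bedMergeL st.1

-- ===== PORT B =====

-- net contribution of the region (l, r) to the coverage of point p
def coverL (l r p : Int) : Int := (if l ≤ p then 1 else 0) - (if r ≤ p then 1 else 0)

def bedSubtract_alt (a : List (String × Int × Int)) (b : List (String × Int × Int)) : List (String × Int × Int) :=
  let a' := bedMergeL a
  let b' := bedMergeL b
  -- per chromosome, cut the line at every region boundary and count coverage
  let chroms := PySem.List.sorted (PySem.Set.ofList (a'.map (·.1) ++ b'.map (·.1))) (fun x => x) false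
  let c := chroms.foldl (fun c ch =>
    let aIv := (a'.filter (fun t => t.1 == ch)).map (fun t => (t.2.1, t.2.2))
    let bIv := (b'.filter (fun t => t.1 == ch)).map (fun t => (t.2.1, t.2.2))
    let pts := PySem.List.sorted
      (PySem.Set.ofList ((aIv ++ bIv).flatMap (fun iv => [iv.1, iv.2]))) (fun x => x) false
    -- zip(pts, pts[1:])
    (pts.zip pts.tail).foldl (fun c pq =>
      let net := (aIv.map (fun iv => coverL iv.1 iv.2 pq.1)).sum
               - (bIv.map (fun iv => coverL iv.1 iv.2 pq.1)).sum
      if net = 1 then c ++ [(ch, pq.1, pq.2)] else c) c) []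
  -- merge bookends
  bedMergeL c

-- ===== PRECONDITION & SPEC =====
def Spec_bedSubtract (a : List (String × Int × Int)) (b : List (String × Int × Int)) (out : List (String × Int × Int)) : Prop := out = bedSubtract_alt a b
instance (a : List (String × Int × Int)) (b : List (String × Int × Int)) (out : List (String × Int × Int)) : Decidable (Spec_bedSubtract a b out) := by unfold Spec_bedSubtract; infer_instance

-- ===== CLAIM (what is proved, stated in full; the proofs are below) =====
def Claim_equal_bedSubtract : Prop := ∀ (a : List (String × Int × Int)) (b : List (String × Int × Int)), Dom_bedSubtract a b → Spec_bedSubtract a b (bedSubtract a b)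

-- ===== LEMMAS AND PROOFS =====

-- events are (chrom, loc, depth) triples
def pvGA (t : String × Int × Int) : List (String × Int × Int) := [(t.1, t.2.1, (1 : Int)), (t.1, t.2.2, (-1 : Int))]
def pvGB (t : String × Int × Int) : List (String × Int × Int) := [(t.1, t.2.1, (-1 : Int)), (t.1, t.2.2, (1 : Int))]
def pvVec (a' b' : List (String × Int × Int)) : List (String × Int × Int) :=
  a'.flatMap pvGA ++ b'.flatMap pvGB

-- the emitted list of A's sweep, as a standalone recursion
def sweepO : List (String × Int × Int) → Int → Option Int → List (String × Int × Int)
  | [], _, _ => []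
  | e :: t, dn, ll =>
    (match ll with
     | some l => if dn = 1 ∧ e.2.1 - l > 0 then [(e.1, l, e.2.1)] else []
     | none => []) ++ sweepO t (dn + e.2.2) (some e.2.1)

-- B's per-chromosome output, as a standalone recursion on the point list
def bSegs (ch : String) (net : Int → Int) : List Int → List (String × Int × Int)
  | p :: q :: r => (if net p = 1 then [(ch, p, q)] else []) ++ bSegs ch net (q :: r)
  | _ => []

def sumD (E : List (String × Int × Int)) : Int := (E.map (fun e => e.2.2)).sum
def sumLE (E : List (String × Int × Int)) (p : Int) : Int :=
  (E.map (fun e => if e.2.1 ≤ p then e.2.2 else 0)).sum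

-- the chromosome block of the sorted event vector
def pvBlock (v : List (String × Int × Int)) (ch : String) : List (String × Int × Int) :=
  PySem.List.sorted (v.filter (fun e => e.1 == ch)) pvKey3 false
theorem sweepO_append (X Y : List (String × Int × Int)) (dn : Int) (ll : Option Int) :
    sweepO (X ++ Y) dn ll
      = sweepO X dn ll ++ sweepO Y (dn + sumD X) (X.foldl (fun _ e => some e.2.1) ll) := by
  induction X generalizing dn ll with
  | nil => simp [sweepO, sumD]
  | cons e t ih =>
    simp only [List.cons_append, sweepO, List.foldl_cons, ih, sumD, List.map_cons, List.sum_cons]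
    rw [List.append_assoc]
    ring_nf

theorem sweepO_flat (t : List (String × Int × Int)) (p : Int) (d : Int)
    (h : ∀ e ∈ t, e.2.1 = p) : sweepO t d (some p) = [] := by
  induction t generalizing d with
  | nil => rfl
  | cons e t ih =>
    have he : e.2.1 = p := h e (by simp)
    simp only [sweepO, he]
    rw [ih _ (fun f hf => h f (by simp [hf]))]
    simp

theorem sweepO_group (Ep : List (String × Int × Int)) (ch : String) (p d0 p0 : Int)
    (hne : Ep ≠ []) (h : ∀ e ∈ Ep, e.1 = ch ∧ e.2.1 = p) :
    sweepO Ep d0 (some p0) = if d0 = 1 ∧ p - p0 > 0 then [(ch, p0, p)] else [] := by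
  cases Ep with
  | nil => exact absurd rfl hne
  | cons e t =>
    have he := h e (by simp)
    simp only [sweepO, he.1, he.2]
    rw [sweepO_flat t p _ (fun f hf => (h f (by simp [hf])).2)]
    simp

theorem sweepO_group0 (Ep : List (String × Int × Int)) (p : Int) (ll : Option Int)
    (h : ∀ e ∈ Ep, e.2.1 = p) : sweepO Ep 0 ll = [] := by
  cases Ep with
  | nil => rfl
  | cons e t =>
    have he : e.2.1 = p := h e (by simp)
    simp only [sweepO, he]
    rw [sweepO_flat t p _ (fun f hf => h f (by simp [hf]))]
    cases ll <;> simp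

theorem foldl_last_loc (X : List (String × Int × Int)) (p : Int) (ll : Option Int)
    (hne : X ≠ []) (h : ∀ e ∈ X, e.2.1 = p) :
    X.foldl (fun _ e => some e.2.1) ll = some p := by
  induction X generalizing ll with
  | nil => exact absurd rfl hne
  | cons e t ih =>
    simp only [List.foldl_cons]
    rcases t with _ | ⟨f, t⟩
    · simp [h e (by simp)]
    · exact ih _ (by simp) (fun g hg => h g (by simp [hg]))

theorem split_min (E : List (String × Int × Int)) (p : Int)
    (hsort : E.Pairwise (fun e f => e.2.1 ≤ f.2.1)) (hge : ∀ e ∈ E, p ≤ e.2.1) :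
    E = E.filter (fun e => decide (e.2.1 = p)) ++ E.filter (fun e => decide (¬ e.2.1 = p)) := by
  induction E with
  | nil => rfl
  | cons e t ih =>
    rcases List.pairwise_cons.mp hsort with ⟨hhead, htail⟩
    by_cases hep : e.2.1 = p
    · simp only [List.filter_cons, hep, decide_true, decide_not]
      simp only [Bool.not_true, if_true]
      simpa using ih htail (fun f hf => hge f (by simp [hf]))
    · have hgt : p < e.2.1 := lt_of_le_of_ne (hge e (by simp)) (fun h => hep h.symm)
      have h1 : t.filter (fun f => decide (f.2.1 = p)) = [] := by
        rw [List.filter_eq_nil_iff]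
        intro f hf
        have : e.2.1 ≤ f.2.1 := hhead f hf
        simp; omega
      have h2 : t.filter (fun f => decide (¬ f.2.1 = p)) = t := by
        rw [List.filter_eq_self]
        intro f hf
        have : e.2.1 ≤ f.2.1 := hhead f hf
        simp; omega
      simp only [List.filter_cons, hep, decide_false, decide_not]
      simp [h1]
      rw [show (fun e : String × Int × Int => !decide (e.2.1 = p)) = (fun e => decide (¬ e.2.1 = p)) from by funext e; simp]
      exact h2.symm

theorem sumLE_append (X Y : List (String × Int × Int)) (p : Int) :
    sumLE (X ++ Y) p = sumLE X p + sumLE Y p := by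
  simp [sumLE]

theorem sumLE_zero (E : List (String × Int × Int)) (p : Int)
    (h : ∀ e ∈ E, p < e.2.1) : sumLE E p = 0 := by
  unfold sumLE
  rw [List.map_congr_left (g := fun _ => (0:Int)) (fun e he => by
    have := h e he; simp; omega)]
  simp

theorem sumLE_full (E : List (String × Int × Int)) (p : Int)
    (h : ∀ e ∈ E, e.2.1 ≤ p) : sumLE E p = sumD E := by
  unfold sumLE sumD
  rw [List.map_congr_left (g := fun e => e.2.2) (fun e he => by simp [h e he])]

theorem bSegs_congr (ch : String) (f g : Int → Int) (pts : List Int)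
    (h : ∀ p ∈ pts, f p = g p) : bSegs ch f pts = bSegs ch g pts := by
  induction pts with
  | nil => rfl
  | cons p rest ih =>
    cases rest with
    | nil => rfl
    | cons q r =>
      simp only [bSegs, h p (by simp), ih (fun x hx => h x (by simp [hx]))]

theorem core_L (pts : List Int) (E : List (String × Int × Int)) (ch : String) (d0 p0 : Int)
    (hch : ∀ e ∈ E, e.1 = ch)
    (hsort : E.Pairwise (fun e f => e.2.1 ≤ f.2.1))
    (hpts : pts.Pairwise (· < ·))
    (hloc : ∀ e ∈ E, e.2.1 ∈ pts)
    (hcov : ∀ p ∈ pts, ∃ e ∈ E, e.2.1 = p)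
    (hlt : ∀ p ∈ pts, p0 < p) :
    sweepO E d0 (some p0) = bSegs ch (fun p => d0 + sumLE E p) (p0 :: pts) := by
  induction pts generalizing E d0 p0 with
  | nil =>
    cases E with
    | nil => rfl
    | cons e t => exact absurd (hloc e (by simp)) (by simp)
  | cons p pts' ih =>
    rcases List.pairwise_cons.mp hpts with ⟨hplt, hpts'⟩
    have hge : ∀ e ∈ E, p ≤ e.2.1 := by
      intro e he
      rcases List.mem_cons.mp (hloc e he) with h | h
      · omega
      · exact le_of_lt (hplt _ h)
    have hsplit := split_min E p hsort hge
    set Ep := E.filter (fun e => decide (e.2.1 = p)) with hEp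
    set E' := E.filter (fun e => decide (¬ e.2.1 = p)) with hE'
    have hEpmem : ∀ e ∈ Ep, e ∈ E ∧ e.2.1 = p := by
      intro e he; rw [hEp, List.mem_filter] at he; exact ⟨he.1, by simpa using he.2⟩
    have hE'mem : ∀ e ∈ E', e ∈ E ∧ e.2.1 ≠ p := by
      intro e he; rw [hE', List.mem_filter] at he; exact ⟨he.1, by simpa using he.2⟩
    have hEpne : Ep ≠ [] := by
      rcases hcov p (by simp) with ⟨e, he, hep⟩
      intro hnil
      have : e ∈ Ep := by rw [hEp, List.mem_filter]; simp [he, hep]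
      rw [hnil] at this; simp at this
    conv_lhs => rw [hsplit]
    rw [sweepO_append]
    rw [sweepO_group Ep ch p d0 p0 hEpne
      (fun e he => ⟨hch e (hEpmem e he).1, (hEpmem e he).2⟩)]
    rw [foldl_last_loc Ep p _ hEpne (fun e he => (hEpmem e he).2)]
    have hE'loc : ∀ e ∈ E', e.2.1 ∈ pts' := by
      intro e he
      rcases List.mem_cons.mp (hloc e (hE'mem e he).1) with h | h
      · exact absurd h (hE'mem e he).2
      · exact h
    have hE'cov : ∀ q ∈ pts', ∃ e ∈ E', e.2.1 = q := by
      intro q hq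
      rcases hcov q (by simp [hq]) with ⟨e, he, heq⟩
      refine ⟨e, ?_, heq⟩
      rw [hE', List.mem_filter]
      have : p < q := hplt q hq
      simp [he]; omega
    rw [ih E' (d0 + sumD Ep) p
      (fun e he => hch e (hE'mem e he).1)
      (hsort.sublist List.filter_sublist)
      hpts' hE'loc hE'cov (fun q hq => hplt q hq)]
    have hnet : ∀ q ∈ p :: pts', d0 + sumD Ep + sumLE E' q = d0 + sumLE E q := by
      intro q hq
      have hpq : p ≤ q := by
        rcases List.mem_cons.mp hq with rfl | h
        · exact le_refl q
        · exact le_of_lt (hplt q h)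
      have : sumLE E q = sumD Ep + sumLE E' q := by
        conv_lhs => rw [hsplit]
        rw [sumLE_append, sumLE_full Ep q (fun e he => by rw [(hEpmem e he).2]; exact hpq)]
      omega
    rw [bSegs_congr ch _ _ (p :: pts') hnet]
    have hp0 : d0 + sumLE E p0 = d0 := by
      rw [sumLE_zero E p0 (fun e he => lt_of_lt_of_le (hlt p (by simp)) (hge e he))]
      ring
    simp only [bSegs, hp0]
    congr 1
    have hppos : p - p0 > 0 := by have := hlt p (by simp); omega
    by_cases hd : d0 = 1
    · simp [hd]
      omega
    · simp [hd]

theorem block_lemma (pts : List Int) (E : List (String × Int × Int)) (ch : String) (ll : Option Int)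
    (hch : ∀ e ∈ E, e.1 = ch)
    (hsort : E.Pairwise (fun e f => e.2.1 ≤ f.2.1))
    (hpts : pts.Pairwise (· < ·))
    (hloc : ∀ e ∈ E, e.2.1 ∈ pts)
    (hcov : ∀ p ∈ pts, ∃ e ∈ E, e.2.1 = p) :
    sweepO E 0 ll = bSegs ch (fun p => sumLE E p) pts := by
  cases pts with
  | nil =>
    cases E with
    | nil => rfl
    | cons e t => exact absurd (hloc e (by simp)) (by simp)
  | cons p pts' =>
    rcases List.pairwise_cons.mp hpts with ⟨hplt, hpts'⟩
    have hge : ∀ e ∈ E, p ≤ e.2.1 := by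
      intro e he
      rcases List.mem_cons.mp (hloc e he) with h | h
      · omega
      · exact le_of_lt (hplt _ h)
    have hsplit := split_min E p hsort hge
    set Ep := E.filter (fun e => decide (e.2.1 = p)) with hEp
    set E' := E.filter (fun e => decide (¬ e.2.1 = p)) with hE'
    have hEpmem : ∀ e ∈ Ep, e ∈ E ∧ e.2.1 = p := by
      intro e he; rw [hEp, List.mem_filter] at he; exact ⟨he.1, by simpa using he.2⟩
    have hE'mem : ∀ e ∈ E', e ∈ E ∧ e.2.1 ≠ p := by
      intro e he; rw [hE', List.mem_filter] at he; exact ⟨he.1, by simpa using he.2⟩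
    have hEpne : Ep ≠ [] := by
      rcases hcov p (by simp) with ⟨e, he, hep⟩
      intro hnil
      have : e ∈ Ep := by rw [hEp, List.mem_filter]; simp [he, hep]
      rw [hnil] at this; simp at this
    conv_lhs => rw [hsplit]
    rw [sweepO_append]
    rw [sweepO_group0 Ep p ll (fun e he => (hEpmem e he).2)]
    rw [foldl_last_loc Ep p _ hEpne (fun e he => (hEpmem e he).2)]
    have hE'loc : ∀ e ∈ E', e.2.1 ∈ pts' := by
      intro e he
      rcases List.mem_cons.mp (hloc e (hE'mem e he).1) with h | h
      · exact absurd h (hE'mem e he).2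
      · exact h
    have hE'cov : ∀ q ∈ pts', ∃ e ∈ E', e.2.1 = q := by
      intro q hq
      rcases hcov q (by simp [hq]) with ⟨e, he, heq⟩
      refine ⟨e, ?_, heq⟩
      rw [hE', List.mem_filter]
      have : p < q := hplt q hq
      simp [he]; omega
    rw [core_L pts' E' ch (0 + sumD Ep) p
      (fun e he => hch e (hE'mem e he).1)
      (hsort.sublist List.filter_sublist)
      hpts' hE'loc hE'cov (fun q hq => hplt q hq)]
    have hnet : ∀ q ∈ p :: pts', 0 + sumD Ep + sumLE E' q = sumLE E q := by
      intro q hq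
      have hpq : p ≤ q := by
        rcases List.mem_cons.mp hq with rfl | h
        · exact le_refl q
        · exact le_of_lt (hplt q h)
      have : sumLE E q = sumD Ep + sumLE E' q := by
        conv_lhs => rw [hsplit]
        rw [sumLE_append, sumLE_full Ep q (fun e he => by rw [(hEpmem e he).2]; exact hpq)]
      omega
    rw [bSegs_congr ch _ _ (p :: pts') hnet]
    simp

-- unfolding equations for sweepO
theorem sweepO_cons_some (e : String × Int × Int) (t : List (String × Int × Int)) (dn l : Int) :
    sweepO (e :: t) dn (some l)
      = (if dn = 1 ∧ e.2.1 - l > 0 then [(e.1, l, e.2.1)] else []) ++ sweepO t (dn + e.2.2) (some e.2.1) := rfl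

theorem sweepO_cons_none (e : String × Int × Int) (t : List (String × Int × Int)) (dn : Int) :
    sweepO (e :: t) dn none = sweepO t (dn + e.2.2) (some e.2.1) := by
  show [] ++ _ = _
  simp

-- A's sweep foldl computes sweepO
theorem foldl_sweep (L : List (String × Int × Int))
    (c0 : List (String × Int × Int)) (dn : Int) (ll : Option Int) :
    (L.foldl
      (fun (st : List (String × Int × Int) × Int × Option Int) e =>
        let c := match st.2.2 with
          | some locLast =>
            if st.2.1 = 1 ∧ e.2.1 - locLast > 0 then st.1 ++ [(e.1, locLast, e.2.1)] else st.1
          | none => st.1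
        (c, st.2.1 + e.2.2, some e.2.1))
      (c0, dn, ll)).1 = c0 ++ sweepO L dn ll := by
  induction L generalizing c0 dn ll with
  | nil => simp [sweepO]
  | cons e t ih =>
    rw [List.foldl_cons]
    cases ll with
    | none =>
      rw [sweepO_cons_none]
      exact ih c0 (dn + e.2.2) (some e.2.1)
    | some l =>
      rw [sweepO_cons_some]
      show (t.foldl _ (if dn = 1 ∧ e.2.1 - l > 0 then c0 ++ [(e.1, l, e.2.1)] else c0, dn + e.2.2, some e.2.1)).1 = _
      rw [ih]
      split_ifs <;> simp [List.append_assoc]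

theorem key3_inj : Function.Injective pvKey3 := by
  intro x y h
  unfold pvKey3 at h
  have h1 := congrArg (fun z => (ofLex z).1) h
  have h2 := congrArg (fun z => (ofLex ((ofLex z).2)).1) h
  have h3 := congrArg (fun z => (ofLex ((ofLex z).2)).2) h
  simp at h1 h2 h3
  exact Prod.ext h1 (Prod.ext h2 h3)

theorem count_flatMap_filter (v : List (String × Int × Int)) (chs : List String)
    (hnd : chs.Nodup) (x : String × Int × Int) :
    ((chs.flatMap (fun ch => v.filter (fun e => e.1 == ch))).count x)
      = if x.1 ∈ chs then v.count x else 0 := by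
  induction chs with
  | nil => simp
  | cons c chs ih =>
    rcases List.nodup_cons.mp hnd with ⟨hc, hnd'⟩
    rw [List.flatMap_cons, List.count_append, ih hnd']
    by_cases hx : x.1 = c
    · have hx2 : x.1 ∉ chs := by rw [hx]; exact hc
      rw [List.count_filter (by simp [hx])]
      simp [hx]
      intro hcc; exact absurd hcc hc
    · have : (v.filter (fun e => e.1 == c)).count x = 0 := by
        rw [List.count_eq_zero]
        intro hmem
        exact hx (by simpa using (List.mem_filter.mp hmem).2)
      by_cases hx3 : x.1 ∈ chs <;> simp [this, hx, hx3]

theorem partition_perm (v : List (String × Int × Int)) (chs : List String)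
    (hnd : chs.Nodup) (hcov : ∀ e ∈ v, e.1 ∈ chs) :
    (chs.flatMap (fun ch => v.filter (fun e => e.1 == ch))).Perm v := by
  rw [List.perm_iff_count]
  intro x
  rw [count_flatMap_filter v chs hnd x]
  by_cases hx : x.1 ∈ chs
  · simp [hx]
  · have : x ∉ v := fun hv => hx (hcov x hv)
    simp [hx, List.count_eq_zero.mpr this]

theorem flatMap_perm (chs : List String)
    (f g : String → List (String × Int × Int))
    (h : ∀ c ∈ chs, (f c).Perm (g c)) :
    (chs.flatMap f).Perm (chs.flatMap g) := by
  induction chs with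
  | nil => simp
  | cons c chs ih =>
    simp only [List.flatMap_cons]
    exact (h c (by simp)).append (ih (fun c' hc' => h c' (by simp [hc'])))

theorem pairwise_key3_flatMap (chs : List String) (F : String → List (String × Int × Int))
    (hchs : chs.Pairwise (· < ·))
    (hblock : ∀ c ∈ chs, (F c).Pairwise (fun e f => pvKey3 e ≤ pvKey3 f))
    (hmem : ∀ c ∈ chs, ∀ e ∈ F c, e.1 = c) :
    (chs.flatMap F).Pairwise (fun e f => pvKey3 e ≤ pvKey3 f) := by
  induction chs with
  | nil => simp
  | cons c chs ih =>
    rcases List.pairwise_cons.mp hchs with ⟨hlt, hchs'⟩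
    simp only [List.flatMap_cons]
    rw [List.pairwise_append]
    refine ⟨hblock c (by simp), ih hchs' (fun c' hc' => hblock c' (by simp [hc']))
      (fun c' hc' => hmem c' (by simp [hc'])), ?_⟩
    intro e he f hf
    rcases List.mem_flatMap.mp hf with ⟨c', hc', hf'⟩
    have hec : e.1 = c := hmem c (by simp) e he
    have hfc : f.1 = c' := hmem c' (by simp [hc']) f hf'
    unfold pvKey3
    rw [Prod.Lex.toLex_le_toLex]
    left
    rw [hec, hfc]
    exact hlt c' hc'

-- the sorted event vector decomposes into per-chromosome sorted blocks
theorem vecS_eq (v : List (String × Int × Int)) (chs : List String)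
    (hchs : chs.Pairwise (· < ·)) (hcov : ∀ e ∈ v, e.1 ∈ chs) :
    PySem.List.sorted v pvKey3 false = chs.flatMap (fun ch => pvBlock v ch) := by
  have hnd : chs.Nodup := hchs.nodup
  apply PySem.List.eq_of_perm_of_pairwise_le_of_injective pvKey3 key3_inj
  · exact (PySem.List.sorted_perm v pvKey3 false).trans
      ((flatMap_perm chs _ _ (fun c _ => PySem.List.sorted_perm _ pvKey3 false)).trans
        (partition_perm v chs hnd hcov)).symm
  · exact PySem.List.sorted_pairwise v pvKey3
  · exact pairwise_key3_flatMap chs _ hchs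
      (fun c _ => PySem.List.sorted_pairwise _ pvKey3)
      (fun c _ e he => by
        unfold pvBlock at he
        have := (PySem.List.mem_sorted (v.filter (fun e => e.1 == c)) pvKey3 false e).mp he
        simpa using (List.mem_filter.mp this).2)

theorem sumD_append (X Y : List (String × Int × Int)) : sumD (X ++ Y) = sumD X + sumD Y := by
  simp [sumD]

theorem sumD_perm (X Y : List (String × Int × Int)) (h : X.Perm Y) : sumD X = sumD Y :=
  (h.map _).sum_eq

theorem sumLE_perm (X Y : List (String × Int × Int)) (p : Int) (h : X.Perm Y) :
    sumLE X p = sumLE Y p := (h.map _).sum_eq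

theorem sumD_filter_gA (a' : List (String × Int × Int)) (ch : String) :
    sumD ((a'.flatMap pvGA).filter (fun e => e.1 == ch)) = 0 := by
  induction a' with
  | nil => simp [sumD]
  | cons t rest ih =>
    rw [List.flatMap_cons, List.filter_append, sumD_append, ih]
    by_cases h : t.1 = ch <;> simp [pvGA, sumD, h]

theorem sumD_filter_gB (b' : List (String × Int × Int)) (ch : String) :
    sumD ((b'.flatMap pvGB).filter (fun e => e.1 == ch)) = 0 := by
  induction b' with
  | nil => simp [sumD]
  | cons t rest ih =>
    rw [List.flatMap_cons, List.filter_append, sumD_append, ih]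
    by_cases h : t.1 = ch <;> simp [pvGB, sumD, h]

theorem sumD_block_zero (a' b' : List (String × Int × Int)) (ch : String) :
    sumD (pvBlock (pvVec a' b') ch) = 0 := by
  unfold pvBlock
  rw [sumD_perm _ _ (PySem.List.sorted_perm _ pvKey3 false)]
  unfold pvVec
  rw [List.filter_append, sumD_append, sumD_filter_gA, sumD_filter_gB]
  ring

theorem sumLE_filter_gA (a' : List (String × Int × Int)) (ch : String) (p : Int) :
    sumLE ((a'.flatMap pvGA).filter (fun e => e.1 == ch)) p
      = ((a'.filter (fun t => t.1 == ch)).map (fun t => coverL t.2.1 t.2.2 p)).sum := by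
  induction a' with
  | nil => simp [sumLE]
  | cons t rest ih =>
    rw [List.flatMap_cons, List.filter_append, sumLE_append, ih, List.filter_cons]
    by_cases h : t.1 = ch
    · simp only [h, beq_self_eq_true, if_true, List.map_cons, List.sum_cons]
      have : sumLE ((pvGA t).filter (fun e => e.1 == ch)) p = coverL t.2.1 t.2.2 p := by
        simp [pvGA, sumLE, h, coverL]
        split_ifs <;> ring
      rw [this]
    · simp [pvGA, sumLE, h]

theorem sumLE_filter_gB (b' : List (String × Int × Int)) (ch : String) (p : Int) :
    sumLE ((b'.flatMap pvGB).filter (fun e => e.1 == ch)) p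
      = -(((b'.filter (fun t => t.1 == ch)).map (fun t => coverL t.2.1 t.2.2 p)).sum) := by
  induction b' with
  | nil => simp [sumLE]
  | cons t rest ih =>
    rw [List.flatMap_cons, List.filter_append, sumLE_append, ih, List.filter_cons]
    by_cases h : t.1 = ch
    · simp only [h, beq_self_eq_true, if_true, List.map_cons, List.sum_cons]
      have : sumLE ((pvGB t).filter (fun e => e.1 == ch)) p = -(coverL t.2.1 t.2.2 p) := by
        simp [pvGB, sumLE, h, coverL]
        split_ifs <;> ring
      rw [this]
      ring
    · simp [pvGB, sumLE, h]

-- B's per-point net count equals the prefix depth of the chromosome block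
theorem net_eq (a' b' : List (String × Int × Int)) (ch : String) (p : Int) :
    (((a'.filter (fun t => t.1 == ch)).map (fun t => (t.2.1, t.2.2))).map
        (fun iv => coverL iv.1 iv.2 p)).sum
      - (((b'.filter (fun t => t.1 == ch)).map (fun t => (t.2.1, t.2.2))).map
        (fun iv => coverL iv.1 iv.2 p)).sum
      = sumLE (pvBlock (pvVec a' b') ch) p := by
  unfold pvBlock
  rw [sumLE_perm _ _ p (PySem.List.sorted_perm _ pvKey3 false)]
  unfold pvVec
  rw [List.filter_append, sumLE_append, sumLE_filter_gA, sumLE_filter_gB]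
  rw [List.map_map, List.map_map]
  have h1 : ((fun iv : Int × Int => coverL iv.1 iv.2 p) ∘ (fun t : String × Int × Int => (t.2.1, t.2.2)))
      = fun t : String × Int × Int => coverL t.2.1 t.2.2 p := rfl
  rw [h1]
  ring

theorem mem_block (v : List (String × Int × Int)) (ch : String) (e : String × Int × Int) :
    e ∈ pvBlock v ch ↔ e ∈ v ∧ e.1 = ch := by
  unfold pvBlock
  rw [PySem.List.mem_sorted]
  simp [List.mem_filter]

theorem block_chrom (v : List (String × Int × Int)) (ch : String) :
    ∀ e ∈ pvBlock v ch, e.1 = ch := fun e he => ((mem_block v ch e).mp he).2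

theorem key3_le_loc (e f : String × Int × Int) (h : pvKey3 e ≤ pvKey3 f) (hc : e.1 = f.1) :
    e.2.1 ≤ f.2.1 := by
  unfold pvKey3 at h
  rw [Prod.Lex.toLex_le_toLex] at h
  rcases h with h | ⟨_, h⟩
  · exact absurd (hc ▸ h) (lt_irrefl _)
  · change toLex (e.2.1, e.2.2) ≤ toLex (f.2.1, f.2.2) at h
    rw [Prod.Lex.toLex_le_toLex] at h
    rcases h with h | ⟨h, _⟩
    · exact le_of_lt h
    · exact le_of_eq h

theorem block_sorted_loc (v : List (String × Int × Int)) (ch : String) :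
    (pvBlock v ch).Pairwise (fun e f => e.2.1 ≤ f.2.1) := by
  have hp := PySem.List.sorted_pairwise (v.filter (fun e => e.1 == ch)) pvKey3
  refine List.Pairwise.imp_of_mem ?_ hp
  intro e f he hf h
  have hce : e.1 = ch := (block_chrom v ch) e he
  have hcf : f.1 = ch := (block_chrom v ch) f hf
  exact key3_le_loc e f h (hce.trans hcf.symm)

-- B's boundary-point list for a chromosome
def pvPts (a' b' : List (String × Int × Int)) (ch : String) : List Int :=
  PySem.List.sorted
    (PySem.Set.ofList
      ((((a'.filter (fun t => t.1 == ch)).map (fun t => (t.2.1, t.2.2)))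
        ++ ((b'.filter (fun t => t.1 == ch)).map (fun t => (t.2.1, t.2.2)))).flatMap
        (fun iv => [iv.1, iv.2]))) (fun x => x) false

theorem mem_pts (a' b' : List (String × Int × Int)) (ch : String) (p : Int) :
    p ∈ pvPts a' b' ch ↔
      ((∃ t ∈ a', t.1 = ch ∧ (p = t.2.1 ∨ p = t.2.2)) ∨
       (∃ t ∈ b', t.1 = ch ∧ (p = t.2.1 ∨ p = t.2.2))) := by
  unfold pvPts
  rw [PySem.List.mem_sorted, PySem.Set.mem_ofList]
  simp only [List.mem_flatMap, List.mem_append, List.mem_map, List.mem_filter, beq_iff_eq]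
  constructor
  · rintro ⟨iv, ⟨t, ⟨ht, hc⟩, rfl⟩ | ⟨t, ⟨ht, hc⟩, rfl⟩, hp⟩
    · exact Or.inl ⟨t, ht, hc, by simpa using hp⟩
    · exact Or.inr ⟨t, ht, hc, by simpa using hp⟩
  · rintro (⟨t, ht, hc, hp⟩ | ⟨t, ht, hc, hp⟩)
    · exact ⟨(t.2.1, t.2.2), Or.inl ⟨t, ⟨ht, hc⟩, rfl⟩, by simpa using hp⟩
    · exact ⟨(t.2.1, t.2.2), Or.inr ⟨t, ⟨ht, hc⟩, rfl⟩, by simpa using hp⟩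

theorem mem_block_loc (a' b' : List (String × Int × Int)) (ch : String) (p : Int) :
    (∃ e ∈ pvBlock (pvVec a' b') ch, e.2.1 = p) ↔
      ((∃ t ∈ a', t.1 = ch ∧ (p = t.2.1 ∨ p = t.2.2)) ∨
       (∃ t ∈ b', t.1 = ch ∧ (p = t.2.1 ∨ p = t.2.2))) := by
  constructor
  · rintro ⟨e, he, rfl⟩
    rcases (mem_block _ ch e).mp he with ⟨hv, hc⟩
    unfold pvVec at hv
    rcases List.mem_append.mp hv with h | h
    · rcases List.mem_flatMap.mp h with ⟨t, ht, hm⟩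
      left
      simp only [pvGA, List.mem_cons, List.not_mem_nil, or_false] at hm
      rcases hm with rfl | rfl
      · exact ⟨t, ht, hc, Or.inl rfl⟩
      · exact ⟨t, ht, hc, Or.inr rfl⟩
    · rcases List.mem_flatMap.mp h with ⟨t, ht, hm⟩
      right
      simp only [pvGB, List.mem_cons, List.not_mem_nil, or_false] at hm
      rcases hm with rfl | rfl
      · exact ⟨t, ht, hc, Or.inl rfl⟩
      · exact ⟨t, ht, hc, Or.inr rfl⟩
  · rintro (⟨t, ht, hc, hp⟩ | ⟨t, ht, hc, hp⟩)
    · rcases hp with rfl | rfl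
      · exact ⟨(t.1, t.2.1, 1), (mem_block _ ch _).mpr
          ⟨List.mem_append.mpr (Or.inl (List.mem_flatMap.mpr ⟨t, ht, by simp [pvGA]⟩)), hc⟩, rfl⟩
      · exact ⟨(t.1, t.2.2, -1), (mem_block _ ch _).mpr
          ⟨List.mem_append.mpr (Or.inl (List.mem_flatMap.mpr ⟨t, ht, by simp [pvGA]⟩)), hc⟩, rfl⟩
    · rcases hp with rfl | rfl
      · exact ⟨(t.1, t.2.1, -1), (mem_block _ ch _).mpr
          ⟨List.mem_append.mpr (Or.inr (List.mem_flatMap.mpr ⟨t, ht, by simp [pvGB]⟩)), hc⟩, rfl⟩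
      · exact ⟨(t.1, t.2.2, 1), (mem_block _ ch _).mpr
          ⟨List.mem_append.mpr (Or.inr (List.mem_flatMap.mpr ⟨t, ht, by simp [pvGB]⟩)), hc⟩, rfl⟩

-- B's inner loop over zip(pts, pts[1:]) computes bSegs
theorem zip_foldl (ch : String) (net : Int → Int) (pts : List Int)
    (c0 : List (String × Int × Int)) :
    ((pts.zip pts.tail).foldl
      (fun c pq => if net pq.1 = 1 then c ++ [(ch, pq.1, pq.2)] else c) c0)
      = c0 ++ bSegs ch net pts := by
  induction pts generalizing c0 with
  | nil => simp [bSegs]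
  | cons p rest ih =>
    cases rest with
    | nil => simp [bSegs]
    | cons q r =>
      show ((q :: r).zip (q :: r).tail).foldl _ (if net p = 1 then c0 ++ [(ch, p, q)] else c0)
        = c0 ++ bSegs ch net (p :: q :: r)
      rw [ih]
      simp only [bSegs]
      split_ifs <;> simp [List.append_assoc]

-- any fold whose step appends a per-element list computes a flatMap
theorem foldl_acc_flatMap (chs : List String)
    (f : List (String × Int × Int) → String → List (String × Int × Int))
    (F : String → List (String × Int × Int))
    (h : ∀ c x, f c x = c ++ F x) :
    ∀ c0, chs.foldl f c0 = c0 ++ chs.flatMap F := by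
  induction chs with
  | nil => simp
  | cons c chs ih =>
    intro c0
    rw [List.foldl_cons, h, ih, List.flatMap_cons, List.append_assoc]

-- the sweep over concatenated zero-sum blocks is the concatenation of the block results
theorem sweepO_blocks (chs : List String) (F : String → List (String × Int × Int))
    (G : String → List (String × Int × Int))
    (hzero : ∀ c ∈ chs, sumD (F c) = 0)
    (hval : ∀ c ∈ chs, ∀ ll, sweepO (F c) 0 ll = G c) :
    ∀ ll, sweepO (chs.flatMap F) 0 ll = chs.flatMap G := by
  induction chs with
  | nil => intro ll; simp [sweepO]
  | cons c chs ih =>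
    intro ll
    rw [List.flatMap_cons, sweepO_append, hval c (by simp) ll,
      hzero c (by simp), add_zero, List.flatMap_cons,
      ih (fun c' hc' => hzero c' (by simp [hc'])) (fun c' hc' ll' => hval c' (by simp [hc']) ll')]

-- B's per-point net as a function
def pvNet (a' b' : List (String × Int × Int)) (ch : String) (p : Int) : Int :=
  (((a'.filter (fun t => t.1 == ch)).map (fun t => (t.2.1, t.2.2))).map
      (fun iv => coverL iv.1 iv.2 p)).sum
  - (((b'.filter (fun t => t.1 == ch)).map (fun t => (t.2.1, t.2.2))).map
      (fun iv => coverL iv.1 iv.2 p)).sum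

-- B's chromosome list
def pvChs (a' b' : List (String × Int × Int)) : List String :=
  PySem.List.sorted (PySem.Set.ofList (a'.map (·.1) ++ b'.map (·.1))) (fun x => x) false

theorem chs_pairwise (a' b' : List (String × Int × Int)) :
    (pvChs a' b').Pairwise (· < ·) := PySem.List.sorted_ofList_pairwise_lt _

theorem chs_cover (a' b' : List (String × Int × Int)) :
    ∀ e ∈ pvVec a' b', e.1 ∈ pvChs a' b' := by
  intro e he
  unfold pvChs
  rw [PySem.List.mem_sorted, PySem.Set.mem_ofList, List.mem_append]
  unfold pvVec at he
  rcases List.mem_append.mp he with h | h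
  · rcases List.mem_flatMap.mp h with ⟨t, ht, hm⟩
    left
    simp only [pvGA, List.mem_cons, List.not_mem_nil, or_false] at hm
    rcases hm with rfl | rfl <;> exact List.mem_map.mpr ⟨t, ht, rfl⟩
  · rcases List.mem_flatMap.mp h with ⟨t, ht, hm⟩
    right
    simp only [pvGB, List.mem_cons, List.not_mem_nil, or_false] at hm
    rcases hm with rfl | rfl <;> exact List.mem_map.mpr ⟨t, ht, rfl⟩

theorem pts_pairwise (a' b' : List (String × Int × Int)) (ch : String) :
    (pvPts a' b' ch).Pairwise (· < ·) := PySem.List.sorted_ofList_pairwise_lt _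

-- the sweep of one chromosome block is B's per-chromosome segment list
theorem block_value (a' b' : List (String × Int × Int)) (ch : String) (ll : Option Int) :
    sweepO (pvBlock (pvVec a' b') ch) 0 ll = bSegs ch (pvNet a' b' ch) (pvPts a' b' ch) := by
  rw [block_lemma (pvPts a' b' ch) (pvBlock (pvVec a' b') ch) ch ll
    (block_chrom _ ch) (block_sorted_loc _ ch) (pts_pairwise a' b' ch)
    (fun e he => (mem_pts a' b' ch e.2.1).mpr ((mem_block_loc a' b' ch e.2.1).mp ⟨e, he, rfl⟩))
    (fun p hp => (mem_block_loc a' b' ch p).mpr ((mem_pts a' b' ch p).mp hp))]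
  exact bSegs_congr ch _ _ _ (fun p _ => (net_eq a' b' ch p).symm)

-- the two pre-merge difference lists coincide
theorem pre_merge_eq (a' b' : List (String × Int × Int)) :
    ((PySem.List.sorted
        (b'.foldl (fun v t => v ++ [(t.1, t.2.1, (-1 : Int)), (t.1, t.2.2, (1 : Int))])
          (a'.foldl (fun v t => v ++ [(t.1, t.2.1, (1 : Int)), (t.1, t.2.2, (-1 : Int))]) []))
        pvKey3 false).foldl
      (fun (st : List (String × Int × Int) × Int × Option Int) e =>
        let c := match st.2.2 with
          | some locLast =>
            if st.2.1 = 1 ∧ e.2.1 - locLast > 0 then st.1 ++ [(e.1, locLast, e.2.1)] else st.1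
          | none => st.1
        (c, st.2.1 + e.2.2, some e.2.1))
      ([], 0, none)).1
    = (pvChs a' b').foldl (fun c ch =>
        let aIv := (a'.filter (fun t => t.1 == ch)).map (fun t => (t.2.1, t.2.2))
        let bIv := (b'.filter (fun t => t.1 == ch)).map (fun t => (t.2.1, t.2.2))
        let pts := PySem.List.sorted
          (PySem.Set.ofList ((aIv ++ bIv).flatMap (fun iv => [iv.1, iv.2]))) (fun x => x) false
        (pts.zip pts.tail).foldl (fun c pq =>
          let net := (aIv.map (fun iv => coverL iv.1 iv.2 pq.1)).sum
                   - (bIv.map (fun iv => coverL iv.1 iv.2 pq.1)).sum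
          if net = 1 then c ++ [(ch, pq.1, pq.2)] else c) c) [] := by
  have hvec : b'.foldl (fun v t => v ++ [(t.1, t.2.1, (-1 : Int)), (t.1, t.2.2, (1 : Int))])
      (a'.foldl (fun v t => v ++ [(t.1, t.2.1, (1 : Int)), (t.1, t.2.2, (-1 : Int))]) [])
      = pvVec a' b' := by
    rw [PySem.List.foldl_append_eq_flatMap, PySem.List.foldl_append_eq_flatMap]
    simp only [List.nil_append]
    rfl
  rw [hvec, foldl_sweep, vecS_eq (pvVec a' b') (pvChs a' b') (chs_pairwise a' b') (chs_cover a' b')]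
  rw [sweepO_blocks (pvChs a' b') _ (fun ch => bSegs ch (pvNet a' b' ch) (pvPts a' b' ch))
    (fun c _ => sumD_block_zero a' b' c) (fun c _ ll => block_value a' b' c ll) none]
  have hB := foldl_acc_flatMap (pvChs a' b')
    (fun c ch =>
      let aIv := (a'.filter (fun t => t.1 == ch)).map (fun t => (t.2.1, t.2.2))
      let bIv := (b'.filter (fun t => t.1 == ch)).map (fun t => (t.2.1, t.2.2))
      let pts := PySem.List.sorted
        (PySem.Set.ofList ((aIv ++ bIv).flatMap (fun iv => [iv.1, iv.2]))) (fun x => x) false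
      (pts.zip pts.tail).foldl (fun c pq =>
        let net := (aIv.map (fun iv => coverL iv.1 iv.2 pq.1)).sum
                 - (bIv.map (fun iv => coverL iv.1 iv.2 pq.1)).sum
        if net = 1 then c ++ [(ch, pq.1, pq.2)] else c) c)
    (fun ch => bSegs ch (pvNet a' b' ch) (pvPts a' b' ch))
    (by intro c x
        exact zip_foldl x (pvNet a' b' x) (pvPts a' b' x) c) []
  rw [hB]

-- ===== VERDICT (by name: the statement is the Claim_ definition above) =====
theorem bedSubtract_spec : Claim_equal_bedSubtract := by
  intro a b _
  show bedSubtract a b = bedSubtract_alt a b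
  exact congrArg bedMergeL (pre_merge_eq (bedMergeL a) (bedMergeL b))
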